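-- pv_equiv track=rewrite | github.com/Vikr-182/PostQL-Data-Analytics | .ipynb_checkpoints/partition-checkpoint.py | iter2
-- ===== SOURCE A (Python) =====
-- import itertools
-- from collections import defaultdict
--
-- thresh = 2
--
-- def def_value():
--     return 0
--
-- def iter2(final1,records):
--     candidates = {}
--     final = defaultdict(def_value)
--     listf = [x[0] for x in final1]
--     for i in itertools.combinations(listf,2):
--         candidates[i] = 0
--
--         for j in records :
--             if set(i).issubset(set(j)):
--                 candidates[i]+=1
--
--     for key,value in candidates.items():
--         if value >= thresh:
--             final[key] = value
--
--     return final
-- ===== SOURCE B (Python) =====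
-- import itertools
-- from collections import defaultdict
--
-- thresh = 2
--
-- def iter2(final1, records):
--     # One pass over records: count co-occurrences only for items of listf
--     # actually present in each record (O(R*k^2) instead of O(L^2*R*S)),
--     # then read the counts off for each candidate pair.
--     listf = [x[0] for x in final1]
--     pc = defaultdict(int)  # counts keyed by ordered (lo, hi) pairs, lo <= hi
--     sf = set(listf)
--     for j in records:
--         vs = sorted(set(j) & sf)
--         for idx, a in enumerate(vs):
--             pc[(a, a)] += 1
--             for b in vs[idx + 1:]:
--                 pc[(a, b)] += 1
--     final = defaultdict(int)
--     for key in itertools.combinations(listf, 2):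
--         lo, hi = key if key[0] <= key[1] else (key[1], key[0])
--         c = pc[(lo, hi)]
--         if c >= thresh:
--             final[key] = c
--     return final
-- ===== Notes on version B (the rewrite author's own statement) =====
-- stated objective: faster
-- what changed: Instead of scanning every record with a subset test for each of the O(L^2) candidate pairs, B makes a single pass over the records, incrementing a counter for every 2-combination of the candidate items present in each record, and then reads the counts off per candidate pair.
import Mathlib
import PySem

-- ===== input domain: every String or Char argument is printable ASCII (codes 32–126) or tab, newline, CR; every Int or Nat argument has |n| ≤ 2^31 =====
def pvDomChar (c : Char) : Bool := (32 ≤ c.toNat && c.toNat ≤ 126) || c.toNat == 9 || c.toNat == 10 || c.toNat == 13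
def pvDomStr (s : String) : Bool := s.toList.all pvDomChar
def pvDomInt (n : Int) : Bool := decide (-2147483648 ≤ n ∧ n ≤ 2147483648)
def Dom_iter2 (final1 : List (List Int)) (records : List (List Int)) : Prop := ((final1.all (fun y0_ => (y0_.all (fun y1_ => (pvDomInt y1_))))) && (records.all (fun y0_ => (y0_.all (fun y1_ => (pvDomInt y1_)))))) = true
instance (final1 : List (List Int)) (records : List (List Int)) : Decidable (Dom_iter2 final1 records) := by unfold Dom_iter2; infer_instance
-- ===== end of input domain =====

-- B replaces A's per-pair scan of all records (a subset test for every candidate pair against every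
-- record) by one pass over the records that counts the 2-combinations of the candidate items actually
-- present in each record; objective: faster (asymptotically fewer record scans).

-- ===== PORT A =====

-- itertools.combinations(listf, 2), hand-ported: all (listf[i], listf[k]) with i < k, in order
def pvPairs2 : List Int → List (Int × Int)
  | [] => []
  | a :: t => t.map (fun b => (a, b)) ++ pvPairs2 t

def iter2 (final1 : List (List Int)) (records : List (List Int)) : List (Int × Int × Int) :=
  -- listf = [x[0] for x in final1]; x[0] raises on an empty row — excluded by Pre_iter2
  let listf := final1.map (fun x => (PySem.List.pyGet? x 0).getD 0)
  let candidates := (pvPairs2 listf).foldl (fun c i =>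
      -- candidates[i] = 0, then for j in records: if set(i).issubset(set(j)): candidates[i] += 1
      records.foldl (fun c j =>
        if PySem.Set.issubset (PySem.Set.ofList [i.1, i.2]) (PySem.Set.ofList j) then
          c.modify i 0 (· + 1)
        else c)
        (c.insert i 0))
      PySem.Dict.empty
  -- for key, value in candidates.items(): if value >= thresh: final[key] = value   (thresh = 2)
  let fin := candidates.items.foldl (fun f kv =>
      if kv.2 ≥ 2 then f.insert kv.1 kv.2 else f) PySem.Dict.empty
  fin.items.map (fun kv => (kv.1.1, kv.1.2, kv.2))

-- ===== PORT B =====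

-- the nested 'for idx, a in enumerate(vs): pc[(a,a)] += 1; for b in vs[idx+1:]: pc[(a,b)] += 1'
def pvBumpAll : List Int → PySem.Dict (Int × Int) Int → PySem.Dict (Int × Int) Int
  | [], pc => pc
  | a :: t, pc =>
      pvBumpAll t (t.foldl (fun pc b => pc.modify (a, b) 0 (· + 1)) (pc.modify (a, a) 0 (· + 1)))

def iter2_alt (final1 : List (List Int)) (records : List (List Int)) : List (Int × Int × Int) :=
  let listf := final1.map (fun x => (PySem.List.pyGet? x 0).getD 0)
  let pc := records.foldl (fun pc j =>
      -- vs = sorted(set(j) & set(listf))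
      let vs := PySem.List.sorted (PySem.Set.inter (PySem.Set.ofList j) listf) (fun v : Int => v) false
      pvBumpAll vs pc) PySem.Dict.empty
  let fin := (pvPairs2 listf).foldl (fun f key =>
      let lohi := if key.1 ≤ key.2 then key else (key.2, key.1)
      let c := pc.getD lohi 0
      if c ≥ 2 then f.insert key c else f) PySem.Dict.empty
  fin.items.map (fun kv => (kv.1.1, kv.1.2, kv.2))

-- ===== PRECONDITION & SPEC =====
-- Pre_ excludes only inputs where A raises: final1 containing an empty row makes x[0] an IndexError.
def Pre_iter2 (final1 : List (List Int)) (records : List (List Int)) : Prop :=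
  ∀ x ∈ final1, x ≠ []
instance (final1 : List (List Int)) (records : List (List Int)) : Decidable (Pre_iter2 final1 records) := by unfold Pre_iter2; infer_instance
def pvWitness_iter2 : List (List Int) × List (List Int) := ([[1], [2], [3]], [[1, 2], [2, 1, 3], [3]])

def Spec_iter2 (final1 : List (List Int)) (records : List (List Int)) (out : List (Int × Int × Int)) : Prop := out = iter2_alt final1 records
instance (final1 : List (List Int)) (records : List (List Int)) (out : List (Int × Int × Int)) : Decidable (Spec_iter2 final1 records out) := by unfold Spec_iter2; infer_instance

-- ===== CLAIM (what is proved, stated in full; the proofs are below) =====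
def Claim_equal_iter2 : Prop := ∀ (final1 : List (List Int)) (records : List (List Int)), Dom_iter2 final1 records → Pre_iter2 final1 records → Spec_iter2 final1 records (iter2 final1 records)

-- ===== LEMMAS AND PROOFS =====

-- the count A computes for a candidate pair i
def pvCnt (records : List (List Int)) (i : Int × Int) : Int :=
  ((records.countP (fun j =>
      PySem.Set.issubset (PySem.Set.ofList [i.1, i.2]) (PySem.Set.ofList j))) : Int)

-- A's inner loop over records, started right after 'candidates[i] = 0'
theorem pvInnerA (records : List (List Int)) (P : List Int → Bool) (i : Int × Int) :
    ∀ (c : PySem.Dict (Int × Int) Int) (v : Int),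
      records.foldl (fun c j => if P j then c.modify i 0 (· + 1) else c) (c.insert i v)
        = c.insert i (v + (records.countP P : Int)) := by
  induction records with
  | nil => intro c v; simp
  | cons j t ih =>
      intro c v
      by_cases h : P j = true
      · have hm : (c.insert i v).modify i 0 (· + 1) = c.insert i (v + 1) := by
          show ((c.insert i v).insert i (((c.insert i v).getD i 0) + 1)) = _
          rw [PySem.Dict.getD_insert]
          simp [PySem.Dict.insert_insert_self]
        simp only [List.foldl_cons, h, if_pos, hm, ih, List.countP_cons, h]
        congr 1
        push_cast
        ring
      · simp only [List.foldl_cons, h]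
        rw [if_neg (by simp [h])]
        rw [ih, List.countP_cons]
        simp [h]

-- dict.fromkeys-style dedup grows on the right
theorem pvDedupAppend (l : List (Int × Int)) (a : Int × Int) :
    PySem.List.dedup (l ++ [a]) = if a ∈ l then PySem.List.dedup l else PySem.List.dedup l ++ [a] := by
  rw [PySem.List.dedup_eq_ofList, PySem.List.dedup_eq_ofList, PySem.Set.ofList_eq_foldl,
    List.foldl_append]
  rw [← PySem.Set.ofList_eq_foldl]
  show PySem.Set.add _ _ = _
  by_cases h : a ∈ l
  · simp [PySem.Set.add, PySem.Set.contains, h, PySem.Set.mem_ofList]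
  · simp [PySem.Set.add, PySem.Set.contains, h, PySem.Set.mem_ofList]

-- a fold of conditional key-determined inserts, characterised
theorem pvCondFold (l : List (Int × Int)) (cond : (Int × Int) → Prop) [DecidablePred cond]
    (g : (Int × Int) → Int) :
    (l.foldl (fun f k => if cond k then f.insert k (g k) else f) PySem.Dict.empty).items
      = ((PySem.List.dedup l).filter (fun k => decide (cond k))).map (fun k => (k, g k)) := by
  induction l using List.reverseRecOn with
  | nil => rfl
  | append_singleton l a ih =>
      rw [List.foldl_append, List.foldl_cons, List.foldl_nil, pvDedupAppend]
      have hkeys : (l.foldl (fun f k => if cond k then f.insert k (g k) else f)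
          PySem.Dict.empty).keys = (PySem.List.dedup l).filter (fun k => decide (cond k)) := by
        simp only [PySem.Dict.keys, ih, List.map_map]
        have hid : ((fun x : (Int × Int) × Int => x.1) ∘ fun k : Int × Int => (k, g k)) = id := rfl
        rw [hid, List.map_id]
      by_cases hc : cond a
      · rw [if_pos hc]
        by_cases hm : a ∈ l
        · rw [if_pos hm]
          have hcont : (l.foldl (fun f k => if cond k then f.insert k (g k) else f)
              PySem.Dict.empty).contains a = true := by
            rw [PySem.Dict.contains_eq_decide_mem_keys, hkeys]
            simp [List.mem_filter, PySem.List.mem_dedup, hm, hc]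
          rw [PySem.Dict.items_insert_of_contains _ _ hcont, ih, List.map_map]
          apply List.map_congr_left
          intro k hk
          by_cases hka : k = a
          · simp [hka]
          · simp [Function.comp, hka]
        · rw [if_neg hm]
          have hcont : (l.foldl (fun f k => if cond k then f.insert k (g k) else f)
              PySem.Dict.empty).contains a = false := by
            rw [PySem.Dict.contains_eq_decide_mem_keys, hkeys]
            simp [List.mem_filter, PySem.List.mem_dedup, hm]
          rw [PySem.Dict.items_insert_of_not_contains _ _ hcont, ih, List.filter_append,
            List.map_append]
          simp [hc]
      · rw [if_neg hc, ih]
        by_cases hm : a ∈ l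
        · rw [if_pos hm]
        · rw [if_neg hm, List.filter_append]
          simp [hc]

-- a fold of unconditional key-determined inserts
theorem pvInsFold (l : List (Int × Int)) (g : (Int × Int) → Int) :
    (l.foldl (fun f k => f.insert k (g k)) PySem.Dict.empty).items
      = (PySem.List.dedup l).map (fun k => (k, g k)) := by
  have h := pvCondFold l (fun _ => True) g
  simp only [if_pos trivial, decide_true, List.filter_true] at h
  exact h

-- count of (x,y) in t.map (a, ·)
theorem pvCountMapPair (t : List Int) (a x y : Int) :
    (t.map (fun b => (a, b))).count (x, y) = if x = a then t.count y else 0 := by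
  induction t with
  | nil => simp
  | cons b t ih =>
      simp only [List.map_cons, List.count_cons, ih]
      by_cases hx : x = a
      · by_cases hy : b = y
        · simp [hx, hy, Prod.ext_iff]
        · simp [hx, hy, Prod.ext_iff]
      · simp [hx, Prod.ext_iff]
        intro h; exact absurd h.symm hx

-- B's per-record double loop, on a strictly increasing vs
theorem pvBumpAll_getD (vs : List Int) (hs : vs.Pairwise (· < ·)) :
    ∀ (pc : PySem.Dict (Int × Int) Int) (x y : Int),
      (pvBumpAll vs pc).getD (x, y) 0
        = pc.getD (x, y) 0 + (if x ∈ vs ∧ y ∈ vs ∧ x ≤ y then 1 else 0) := by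
  induction vs with
  | nil => intro pc x y; simp [pvBumpAll]
  | cons a t ih =>
      have ha : ∀ b ∈ t, a < b := (List.pairwise_cons.mp hs).1
      have pt : t.Pairwise (· < ·) := (List.pairwise_cons.mp hs).2
      have hnt : a ∉ t := fun h => lt_irrefl a (ha a h)
      have hnd : t.Nodup := pt.imp (fun h => ne_of_lt h)
      intro pc x y
      show (pvBumpAll t _).getD (x, y) 0 = _
      rw [ih pt]
      have hinner : (t.foldl (fun pc b => pc.modify (a, b) 0 (· + 1))
            (pc.modify (a, a) 0 (· + 1))).getD (x, y) 0
          = pc.getD (x, y) 0 + (if (x, y) = (a, a) then 1 else 0)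
            + (if x = a then (t.count y : Int) else 0) := by
        rw [← List.foldl_map (f := fun b => (a, b))
            (g := fun (d : PySem.Dict (Int × Int) Int) k => d.modify k 0 (· + 1))]
        rw [PySem.Dict.getD_foldl_modify_add_one, PySem.Dict.getD_modify, pvCountMapPair]
        by_cases hxy : (x, y) = (a, a)
        · have hx : x = a := congrArg Prod.fst hxy
          have hy : y = a := congrArg Prod.snd hxy
          subst hx; subst hy
          simp
        · rw [if_neg hxy]
          by_cases hx : x = a
          · have hy : ¬ y = a := fun h => hxy (by rw [hx, h])
            simp [hx, hy]
          · simp [hx]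
      rw [hinner]
      have hcy : (t.count y : Int) = if y ∈ t then 1 else 0 := by
        by_cases h : y ∈ t
        · rw [List.count_eq_one_of_mem hnd h]; simp [h]
        · rw [List.count_eq_zero_of_not_mem h]; simp [h]
      rw [hcy]
      simp only [List.mem_cons]
      by_cases hx : x = a
      · subst hx
        by_cases hy : y = x
        · subst hy
          simp [hnt, le_refl]
        · by_cases hyt : y ∈ t
          · have hle : x ≤ y := le_of_lt (ha y hyt)
            simp [Prod.ext_iff, hy, hnt, hyt, hle]
          · simp [Prod.ext_iff, hy, hnt, hyt]
      · by_cases hy : y = a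
        · have hR : ¬ ((x = a ∨ x ∈ t) ∧ (y = a ∨ y ∈ t) ∧ x ≤ y) := by
            rintro ⟨hx1 | hx1, _, hle⟩
            · exact hx hx1
            · rw [hy] at hle; exact absurd hle (not_le.mpr (ha x hx1))
          have hT : ¬ (x ∈ t ∧ y ∈ t ∧ x ≤ y) := fun ⟨_, hyt2, _⟩ => hnt (hy ▸ hyt2)
          simp [Prod.ext_iff, hx, hT]
          intro hx1 _
          rw [hy]; exact ha x hx1
        · simp [Prod.ext_iff, hx, hy]

-- B's counter after the whole pass over records
theorem pvPcFinal (records : List (List Int)) (listf : List Int) :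
    ∀ (pc : PySem.Dict (Int × Int) Int) (x y : Int),
      (records.foldl (fun pc j =>
          pvBumpAll (PySem.List.sorted (PySem.Set.inter (PySem.Set.ofList j) listf)
            (fun v : Int => v) false) pc) pc).getD (x, y) 0
        = pc.getD (x, y) 0
          + (records.countP (fun j => decide (x ∈ j ∧ x ∈ listf ∧ y ∈ j ∧ y ∈ listf ∧ x ≤ y)) : Int) := by
  induction records with
  | nil => intro pc x y; simp
  | cons j t ih =>
      intro pc x y
      rw [List.foldl_cons, ih]
      have hnd : (PySem.Set.inter (PySem.Set.ofList j) listf).Nodup :=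
        PySem.Set.nodup_inter _ _ (PySem.Set.nodup_ofList j)
      have hsvs : (PySem.List.sorted (PySem.Set.inter (PySem.Set.ofList j) listf)
          (fun v : Int => v) false).Pairwise (· < ·) := by
        have hle := PySem.List.sorted_pairwise (PySem.Set.inter (PySem.Set.ofList j) listf)
          (fun v : Int => v)
        have hperm := PySem.List.sorted_perm (PySem.Set.inter (PySem.Set.ofList j) listf)
          (fun v : Int => v) false
        have hnd2 := hperm.nodup_iff.mpr hnd
        exact (hle.and hnd2).imp (fun h => lt_of_le_of_ne h.1 h.2)
      rw [pvBumpAll_getD _ hsvs]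
      have hiff : (x ∈ PySem.List.sorted (PySem.Set.inter (PySem.Set.ofList j) listf)
              (fun v : Int => v) false
            ∧ y ∈ PySem.List.sorted (PySem.Set.inter (PySem.Set.ofList j) listf)
              (fun v : Int => v) false ∧ x ≤ y)
          ↔ (x ∈ j ∧ x ∈ listf ∧ y ∈ j ∧ y ∈ listf ∧ x ≤ y) := by
        rw [PySem.List.mem_sorted, PySem.List.mem_sorted, PySem.Set.mem_inter,
          PySem.Set.mem_inter, PySem.Set.mem_ofList, PySem.Set.mem_ofList]
        tauto
      rw [List.countP_cons]
      by_cases hp : x ∈ j ∧ x ∈ listf ∧ y ∈ j ∧ y ∈ listf ∧ x ≤ y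
      · rw [if_pos (hiff.mpr hp)]
        simp [hp]
        ring
      · rw [if_neg (fun h => hp (hiff.mp h))]
        simp [hp]

theorem pvPairs2_mem (l : List Int) (a b : Int) (h : (a, b) ∈ pvPairs2 l) : a ∈ l ∧ b ∈ l := by
  induction l with
  | nil => simp [pvPairs2] at h
  | cons c t ih =>
      simp only [pvPairs2, List.mem_append, List.mem_map] at h
      rcases h with ⟨b', hb', he⟩ | h
      · obtain ⟨h1, h2⟩ := Prod.mk.injEq _ _ _ _ ▸ he
        subst h1; subst h2
        exact ⟨List.mem_cons_self, List.mem_cons_of_mem _ hb'⟩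
      · exact ⟨List.mem_cons_of_mem _ (ih h).1, List.mem_cons_of_mem _ (ih h).2⟩

-- ===== VERDICT (by name: the statement is the Claim_ definition above) =====
theorem iter2_spec : Claim_equal_iter2 := by
  intro final1 records _ _
  show iter2 final1 records = iter2_alt final1 records
  simp only [iter2, iter2_alt]
  set listf := final1.map (fun x => (PySem.List.pyGet? x 0).getD 0) with hlf
  set pc := records.foldl (fun pc j =>
      pvBumpAll (PySem.List.sorted (PySem.Set.inter (PySem.Set.ofList j) listf)
        (fun v : Int => v) false) pc) PySem.Dict.empty with hpc
  -- A's first loop builds exactly the per-pair counts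
  have hA1 : (fun (c : PySem.Dict (Int × Int) Int) (i : Int × Int) =>
      records.foldl (fun c j =>
        if PySem.Set.issubset (PySem.Set.ofList [i.1, i.2]) (PySem.Set.ofList j) then
          c.modify i 0 (· + 1) else c) (c.insert i 0))
      = fun c i => c.insert i (pvCnt records i) := by
    funext c i
    rw [pvInnerA records _ i c 0, zero_add]
    rfl
  rw [hA1]
  rw [pvInsFold, List.foldl_map]
  rw [pvCondFold (PySem.List.dedup (pvPairs2 listf)) (fun k => pvCnt records k ≥ 2) (pvCnt records)]
  rw [pvCondFold (pvPairs2 listf)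
    (fun k => pc.getD (if k.1 ≤ k.2 then k else (k.2, k.1)) 0 ≥ 2)
    (fun k => pc.getD (if k.1 ≤ k.2 then k else (k.2, k.1)) 0)]
  have hdd : PySem.List.dedup (PySem.List.dedup (pvPairs2 listf)) = PySem.List.dedup (pvPairs2 listf) := by
    rw [PySem.List.dedup_eq_ofList, PySem.List.dedup_eq_ofList, PySem.Set.ofList_ofList]
  rw [hdd]
  -- B's counter agrees with A's per-pair count on every candidate pair
  have hval : ∀ k ∈ PySem.List.dedup (pvPairs2 listf),
      pc.getD (if k.1 ≤ k.2 then k else (k.2, k.1)) 0 = pvCnt records k := by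
    intro k hk
    obtain ⟨a, b⟩ := k
    have hk' : (a, b) ∈ pvPairs2 listf := (PySem.List.mem_dedup _ _).mp hk
    obtain ⟨ha, hb⟩ := pvPairs2_mem listf a b hk'
    have hcong : ∀ (u w : Int), u ∈ listf → w ∈ listf → u ≤ w → (u = a ∧ w = b) ∨ (u = b ∧ w = a) →
        (records.countP (fun j => decide (u ∈ j ∧ u ∈ listf ∧ w ∈ j ∧ w ∈ listf ∧ u ≤ w)) : Int)
          = pvCnt records (a, b) := by
      intro u w hu hw huw hcase
      unfold pvCnt
      congr 1
      apply List.countP_congr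
      intro j _
      rcases hcase with ⟨h1, h2⟩ | ⟨h1, h2⟩ <;> subst h1 <;> subst h2 <;>
        simp [PySem.Set.issubset_iff, PySem.Set.mem_ofList, hu, hw, huw] <;> tauto
    by_cases hab : a ≤ b
    · rw [if_pos hab]
      rw [hpc, pvPcFinal records listf PySem.Dict.empty a b, PySem.Dict.getD_empty, zero_add]
      exact hcong a b ha hb hab (Or.inl ⟨rfl, rfl⟩)
    · rw [if_neg hab]
      rw [hpc, pvPcFinal records listf PySem.Dict.empty b a, PySem.Dict.getD_empty, zero_add]
      exact hcong b a hb ha (le_of_lt (not_le.mp hab)) (Or.inr ⟨rfl, rfl⟩)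
  have hfil : (PySem.List.dedup (pvPairs2 listf)).filter (fun k => decide (pvCnt records k ≥ 2))
      = (PySem.List.dedup (pvPairs2 listf)).filter
          (fun k => decide (pc.getD (if k.1 ≤ k.2 then k else (k.2, k.1)) 0 ≥ 2)) := by
    apply List.filter_congr
    intro k hk
    rw [hval k hk]
  rw [← hfil]
  apply congrArg
  apply List.map_congr_left
  intro k hk
  rw [hval k (List.mem_of_mem_filter hk)]
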